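-- pv_equiv track=rewrite | github.com/kryptc/sql-nano | engine.py | parseWhere
-- ===== SOURCE A (Python) =====
-- def parseWhere(cond):
--     part = cond
--     temp = []
--
--     for k in range(len(part)):
--         minitemp = ""
--         for j in range(len(part[k])):
--             if part[k][j] in ["=",">",">=","<","<="]:
--                 if (minitemp != ""):
--                     temp.append(minitemp)
--                 temp.append(part[k][j])
--                 minitemp = ""
--             else:
--                 minitemp += part[k][j]
--         if (minitemp != ""):
--             temp.append(minitemp)
--     return temp
-- ===== SOURCE B (Python) =====
-- import re
--
-- _TOKEN = re.compile(r'[^=<>]+|[=<>]')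
--
-- def parseWhere(cond):
--     # Regex tokenizer: maximal runs of non-operator chars, or single operator chars.
--     temp = []
--     for elem in cond:
--         temp.extend(_TOKEN.findall(elem))
--     return temp
-- ===== Notes on version B (the rewrite author's own statement) =====
-- stated objective: idiomatic
-- what changed: Replaces the nested character-by-character accumulator loop (with explicit flush logic) by a single regex tokenizing pass per element: re.findall(r'[^=<>]+|[=<>]') yields maximal non-operator runs and individual operator characters directly.
import Mathlib
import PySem

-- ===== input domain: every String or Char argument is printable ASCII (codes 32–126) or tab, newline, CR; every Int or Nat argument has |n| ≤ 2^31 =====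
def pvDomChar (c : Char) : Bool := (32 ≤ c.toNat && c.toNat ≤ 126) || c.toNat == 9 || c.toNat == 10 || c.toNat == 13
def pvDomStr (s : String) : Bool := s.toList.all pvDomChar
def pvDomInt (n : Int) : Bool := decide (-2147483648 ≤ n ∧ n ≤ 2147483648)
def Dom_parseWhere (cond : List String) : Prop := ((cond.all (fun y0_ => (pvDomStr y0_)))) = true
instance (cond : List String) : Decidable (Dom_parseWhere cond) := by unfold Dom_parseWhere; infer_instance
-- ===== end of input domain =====

-- B replaces A's nested char-accumulator loop with a regex tokenizing pass (idiomatic; same cost).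

-- ===== PORT A =====
-- the literal list A's membership test uses (its two-char entries can never equal a 1-char string)
def pvOpStrs : List String := ["=", ">", ">=", "<", "<="]

-- one step of A's inner character loop: state is (temp, minitemp), minitemp kept as a char list
def pvStepA (acc : List String × List Char) (c : Char) : List String × List Char :=
  if pvOpStrs.contains (String.ofList [c]) then
    ((if acc.2 ≠ [] then acc.1 ++ [String.ofList acc.2] else acc.1) ++ [String.ofList [c]], [])
  else (acc.1, acc.2 ++ [c])

-- body of A's outer loop: run the inner loop over the string's chars, then flush minitemp
def pvBodyA (temp : List String) (s : String) : List String :=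
  let r := s.toList.foldl pvStepA (temp, [])
  if r.2 ≠ [] then r.1 ++ [String.ofList r.2] else r.1

def parseWhere (cond : List String) : List String :=
  cond.foldl pvBodyA []

-- ===== PORT B =====
def pvIsOp (c : Char) : Bool := c = '=' || c = '<' || c = '>'

-- port of re.findall(r'[^=<>]+|[=<>]', elem): each leftmost match is either a single
-- operator character or the maximal run of non-operator characters
def pvFindall : List Char → List String
  | [] => []
  | c :: rest =>
    if pvIsOp c then String.ofList [c] :: pvFindall rest
    else
      String.ofList (c :: rest.takeWhile (fun x => !pvIsOp x)) ::
        pvFindall (rest.dropWhile (fun x => !pvIsOp x))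
  termination_by l => l.length
  decreasing_by
    · simp
    · simp
      exact List.length_dropWhile_le _ _

def parseWhere_alt (cond : List String) : List String :=
  cond.foldl (fun temp s => temp ++ pvFindall s.toList) []

-- ===== PRECONDITION & SPEC =====
def Spec_parseWhere (cond : List String) (out : List String) : Prop := out = parseWhere_alt cond
instance (cond : List String) (out : List String) : Decidable (Spec_parseWhere cond out) := by unfold Spec_parseWhere; infer_instance

-- ===== CLAIM (what is proved, stated in full; the proofs are below) =====
def Claim_equal_parseWhere : Prop := ∀ (cond : List String), Dom_parseWhere cond → Spec_parseWhere cond (parseWhere cond)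

-- ===== LEMMAS AND PROOFS =====

-- A's membership test on a 1-char string agrees with B's simple char test
lemma contains_op (c : Char) : pvOpStrs.contains (String.ofList [c]) = pvIsOp c := by
  have hb : ∀ (s t : String), (s == t) = decide (s = t) := by
    intro s t; rw [Bool.eq_iff_iff]; simp
  have h1 : (String.ofList [c] = "=") ↔ c = '=' := by
    rw [show ("=" : String) = String.ofList ['='] from rfl, String.ofList_inj]; simp
  have h2 : (String.ofList [c] = ">") ↔ c = '>' := by
    rw [show (">" : String) = String.ofList ['>'] from rfl, String.ofList_inj]; simp
  have h3 : (String.ofList [c] = ">=") ↔ False := by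
    rw [show (">=" : String) = String.ofList ['>','='] from rfl, String.ofList_inj]; simp
  have h4 : (String.ofList [c] = "<") ↔ c = '<' := by
    rw [show ("<" : String) = String.ofList ['<'] from rfl, String.ofList_inj]; simp
  have h5 : (String.ofList [c] = "<=") ↔ False := by
    rw [show ("<=" : String) = String.ofList ['<','='] from rfl, String.ofList_inj]; simp
  simp only [pvOpStrs, pvIsOp, List.contains, List.elem_cons, List.elem_nil, hb,
    h1, h2, h3, h4, h5, decide_false]
  by_cases a : c = '=' <;> by_cases b : c = '<' <;> by_cases d : c = '>' <;> simp [a, b, d]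

lemma takeWhile_append_of_all {p : Char → Bool} (l₁ l₂ : List Char) (h : ∀ c ∈ l₁, p c = true) :
    (l₁ ++ l₂).takeWhile p = l₁ ++ l₂.takeWhile p := by
  induction l₁ with
  | nil => rfl
  | cons a t ih =>
    simp only [List.cons_append, List.takeWhile_cons, h a (by simp), if_true]
    simp [ih (fun c hc => h c (by simp [hc]))]

lemma dropWhile_append_of_all {p : Char → Bool} (l₁ l₂ : List Char) (h : ∀ c ∈ l₁, p c = true) :
    (l₁ ++ l₂).dropWhile p = l₂.dropWhile p := by
  induction l₁ with
  | nil => rfl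
  | cons a t ih =>
    simp only [List.cons_append, List.dropWhile_cons, h a (by simp)]
    exact ih (fun c hc => h c (by simp [hc]))

lemma findall_nonop (m : List Char) (h : ∀ c ∈ m, pvIsOp c = false) :
    pvFindall m = if m = [] then [] else [String.ofList m] := by
  cases m with
  | nil => simp [pvFindall]
  | cons c rest =>
    rw [pvFindall, if_neg (by simp [h c (by simp)])]
    have ht : rest.takeWhile (fun x => !pvIsOp x) = rest :=
      List.takeWhile_eq_self_iff.mpr (fun c hc => by simp [h c (by simp [hc])])
    have hd : rest.dropWhile (fun x => !pvIsOp x) = [] :=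
      List.dropWhile_eq_nil_iff.mpr (fun c hc => by simp [h c (by simp [hc])])
    simp [ht, hd, pvFindall]

-- loop invariant: running A's inner loop over cs from state (temp, mini) and flushing equals
-- temp ++ the regex tokens of (mini ++ cs), provided mini contains no operator characters
lemma key (cs : List Char) (temp : List String) (mini : List Char)
    (h : ∀ c ∈ mini, pvIsOp c = false) :
    (let r := cs.foldl pvStepA (temp, mini)
     if r.2 ≠ [] then r.1 ++ [String.ofList r.2] else r.1) = temp ++ pvFindall (mini ++ cs) := by
  induction cs generalizing temp mini with
  | nil =>
    simp only [List.foldl_nil, List.append_nil, findall_nonop mini h]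
    by_cases hm : mini = [] <;> simp [hm]
  | cons c cs ih =>
    simp only [List.foldl_cons]
    rw [show pvStepA (temp, mini) c =
        if pvIsOp c then
          ((if mini ≠ [] then temp ++ [String.ofList mini] else temp) ++ [String.ofList [c]], [])
        else (temp, mini ++ [c]) from by rw [pvStepA, contains_op]]
    by_cases hc : pvIsOp c = true
    · rw [if_pos hc]
      rw [ih _ [] (by simp)]
      simp only [List.nil_append]
      cases mini with
      | nil =>
        rw [if_neg (by simp), List.nil_append, pvFindall, if_pos hc]
        simp
      | cons m0 mrest =>
        rw [if_pos (by simp), List.cons_append, pvFindall,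
          if_neg (by simp [h m0 (by simp)]),
          takeWhile_append_of_all mrest (c :: cs)
            (fun x hx => by simp [h x (by simp [hx])]),
          dropWhile_append_of_all mrest (c :: cs)
            (fun x hx => by simp [h x (by simp [hx])]),
          List.dropWhile_cons, List.takeWhile_cons]
        simp only [hc, Bool.not_true, Bool.false_eq_true, if_false]
        rw [pvFindall, if_pos hc]
        simp
    · rw [if_neg hc]
      rw [ih _ (mini ++ [c]) (by
        intro x hx
        rcases List.mem_append.mp hx with hx | hx
        · exact h x hx
        · simp at hx; subst hx; exact Bool.eq_false_iff.mpr hc)]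
      simp

-- ===== VERDICT (by name: the statement is the Claim_ definition above) =====
theorem parseWhere_spec : Claim_equal_parseWhere := by
  intro cond hdom
  clear hdom
  unfold Spec_parseWhere parseWhere parseWhere_alt
  induction cond using List.reverseRecOn with
  | nil => rfl
  | append_singleton xs s ih =>
    rw [List.foldl_append, List.foldl_append, List.foldl_cons, List.foldl_nil,
      List.foldl_cons, List.foldl_nil, ih]
    have := key s.toList (List.foldl (fun temp s => temp ++ pvFindall s.toList) [] xs) [] (by simp)
    simpa [pvBodyA] using this
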